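-- pv_equiv track=rewrite | github.com/Michaszek224/podstawyKryptografii | zadanie3/main.py | policzkolizje
-- ===== SOURCE A (Python) =====
-- def policzkolizje(hashe):
--     widziane = set()
--     kolizje = 0
--     for h in hashe:
--         prefiks = h[:3]
--         if prefiks in widziane:
--             kolizje += 1
--         else:
--             widziane.add(prefiks)
--     return kolizje
-- ===== SOURCE B (Python) =====
-- def policzkolizje(hashe):
--     # Sort the 3-char prefixes; in sorted order equal prefixes are adjacent,
--     # so the number of collisions is the number of equal adjacent pairs.
--     p = sorted(h[:3] for h in hashe)
--     k = 0
--     for a, b in zip(p, p[1:]):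
--         if a == b:
--             k += 1
--     return k
-- ===== Notes on version B (the rewrite author's own statement) =====
-- stated objective: alternative
-- what changed: Replaces the hash-set membership loop (first-seen vs repeat counter) with sort-then-scan: sort the 3-char prefixes and count equal adjacent pairs, which equals the collision count because sorting makes equal prefixes adjacent.
import Mathlib
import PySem

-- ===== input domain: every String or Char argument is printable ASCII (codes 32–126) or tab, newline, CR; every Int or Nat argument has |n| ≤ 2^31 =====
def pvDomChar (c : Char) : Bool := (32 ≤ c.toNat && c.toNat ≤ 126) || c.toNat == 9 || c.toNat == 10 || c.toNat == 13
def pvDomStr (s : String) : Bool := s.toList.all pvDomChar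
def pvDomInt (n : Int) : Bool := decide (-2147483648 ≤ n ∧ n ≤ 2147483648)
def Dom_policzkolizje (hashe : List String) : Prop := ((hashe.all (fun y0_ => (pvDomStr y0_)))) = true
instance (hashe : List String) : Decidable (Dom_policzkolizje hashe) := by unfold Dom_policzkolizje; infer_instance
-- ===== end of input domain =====

-- B sorts the 3-char prefixes and counts equal adjacent pairs instead of keeping a
-- seen-set with a running collision counter (objective: alternative algorithm).
-- ===== PORT A =====
def policzkolizje (hashe : List String) : Int :=
  (hashe.foldl
    (fun (st : PySem.Set String × Int) h =>
      let prefiks := PySem.Str.slice h none (some 3)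
      if PySem.Set.contains st.1 prefiks then (st.1, st.2 + 1)
      else (PySem.Set.add st.1 prefiks, st.2))
    (PySem.Set.empty, 0)).2

-- ===== PORT B =====
-- the adjacent-pair scan of B's loop ('for a, b in zip(p, p[1:]): if a == b: k += 1')
def pvScan (p : List String) : Int :=
  (p.zip (PySem.List.slice p (some 1) none)).foldl
    (fun (k : Int) ab => if ab.1 == ab.2 then k + 1 else k) 0

def policzkolizje_alt (hashe : List String) : Int :=
  pvScan (PySem.List.sorted (hashe.map (fun h => PySem.Str.slice h none (some 3))) (fun x => x) false)

-- ===== PRECONDITION & SPEC =====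
def Spec_policzkolizje (hashe : List String) (out : Int) : Prop := out = policzkolizje_alt hashe
instance (hashe : List String) (out : Int) : Decidable (Spec_policzkolizje hashe out) := by unfold Spec_policzkolizje; infer_instance

-- ===== CLAIM (what is proved, stated in full; the proofs are below) =====
def Claim_equal_policzkolizje : Prop := ∀ (hashe : List String), Dom_policzkolizje hashe → Spec_policzkolizje hashe (policzkolizje hashe)

-- ===== LEMMAS AND PROOFS =====

-- A's loop invariant: final counter = start + (#processed) - (growth of the seen set).
theorem policzkolizje_loop_inv (l : List String) (s : PySem.Set String) (k : Int) :
    (l.foldl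
      (fun (st : PySem.Set String × Int) h =>
        let prefiks := PySem.Str.slice h none (some 3)
        if PySem.Set.contains st.1 prefiks then (st.1, st.2 + 1)
        else (PySem.Set.add st.1 prefiks, st.2))
      (s, k)).2
    = k + (l.length : Int)
        - (((List.foldl PySem.Set.add s (l.map (fun h => PySem.Str.slice h none (some 3)))).length : Int)
            - (s.length : Int)) := by
  induction l generalizing s k with
  | nil => simp
  | cons h t ih =>
    simp only [List.foldl_cons, List.map_cons, List.length_cons]
    by_cases hc : PySem.Set.contains s (PySem.Str.slice h none (some 3)) = true
    · have hm : PySem.Str.slice h none (some 3) ∈ s := by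
        simpa [PySem.Set.contains] using hc
      have hadd : PySem.Set.add s (PySem.Str.slice h none (some 3)) = s := by
        simp [PySem.Set.add, hm]
      simp only [hc, if_pos, hadd]
      rw [ih]
      push_cast
      ring
    · have hm : PySem.Str.slice h none (some 3) ∉ s := by
        simpa [PySem.Set.contains] using hc
      have hadd : PySem.Set.add s (PySem.Str.slice h none (some 3))
          = s ++ [PySem.Str.slice h none (some 3)] := by
        simp [PySem.Set.add, hm]
      simp only [hc, if_neg, Bool.not_eq_true]
      rw [ih, hadd]
      simp only [List.length_append, List.length_cons, List.length_nil]
      push_cast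
      ring

-- the distinct count kept by A's seen-set is the finset cardinality
theorem ofList_length_eq_card (xs : List String) :
    (PySem.Set.ofList xs).length = xs.toFinset.card := by
  have hnd : (PySem.Set.ofList xs).Nodup := PySem.Set.nodup_ofList xs
  have hfs : (PySem.Set.ofList xs).toFinset = xs.toFinset := by
    ext y; simp [List.mem_toFinset, PySem.Set.mem_ofList]
  rw [← List.toFinset_card_of_nodup hnd, hfs]

-- B's scan over a ≤-sorted list: (#equal adjacent pairs) + (#distinct) = length
theorem adj_count_sorted (ys : List String) (h : ys.Pairwise (· ≤ ·)) (k : Int) :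
    ((ys.zip (ys.drop 1)).foldl (fun (k : Int) ab => if ab.1 == ab.2 then k + 1 else k) k)
      + (ys.toFinset.card : Int) = k + (ys.length : Int) := by
  induction ys generalizing k with
  | nil => simp
  | cons a t ih =>
    cases t with
    | nil => simp
    | cons b t' =>
      have hab : a ≤ b := (List.pairwise_cons.mp h).1 b (by simp)
      have ht : (b :: t').Pairwise (· ≤ ·) := (List.pairwise_cons.mp h).2
      by_cases heq : a = b
      · subst heq
        have hmem : a ∈ (a :: t').toFinset := by simp
        simp only [List.drop_succ_cons, List.drop_zero, List.zip_cons_cons, List.foldl_cons,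
          List.toFinset_cons]
        rw [Finset.insert_eq_self.mpr (by simp)]
        have := ih ht (if (a == a) then k + 1 else k)
        simp only [List.drop_succ_cons, List.drop_zero, List.toFinset_cons,
          List.length_cons, beq_self_eq_true, if_true] at this ⊢
        push_cast at this ⊢
        omega
      · have hnotmem : a ∉ (b :: t') := by
          intro hmem
          rcases List.mem_cons.mp hmem with h1 | h1
          · exact heq h1
          · have hb : b ≤ a := (List.pairwise_cons.mp ht).1 a h1
            exact heq (le_antisymm hab hb)
        simp only [List.drop_succ_cons, List.drop_zero, List.zip_cons_cons, List.foldl_cons,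
          List.toFinset_cons]
        rw [Finset.card_insert_of_notMem (by simpa using hnotmem)]
        have hne : (a == b) = false := beq_false_of_ne heq
        simp only [hne]
        have := ih ht k
        simp only [List.drop_succ_cons, List.drop_zero, List.length_cons,
          List.toFinset_cons] at this ⊢
        push_cast at this ⊢
        omega

-- ===== VERDICT (by name: the statement is the Claim_ definition above) =====
theorem policzkolizje_spec : Claim_equal_policzkolizje := by
  intro hashe _
  unfold Spec_policzkolizje policzkolizje policzkolizje_alt pvScan
  rw [policzkolizje_loop_inv]
  set ps := hashe.map (fun h => PySem.Str.slice h none (some 3)) with hps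
  set q := PySem.List.sorted ps (fun x => x) false with hq
  have hperm : q.Perm ps := PySem.List.sorted_perm ps (fun x => x) false
  have hpw : q.Pairwise (· ≤ ·) := by
    simpa using PySem.List.sorted_pairwise ps (fun x => x)
  have hslice : PySem.List.slice q (some 1) none = q.drop 1 := by
    simpa using PySem.List.slice_from_natCast q 1
  rw [hslice]
  have hadj := adj_count_sorted q hpw 0
  have hcard : q.toFinset = ps.toFinset := List.toFinset_eq_of_perm _ _ hperm
  have hlen : q.length = ps.length := hperm.length_eq
  have hA : (List.foldl PySem.Set.add PySem.Set.empty ps).length = ps.toFinset.card := by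
    rw [show (PySem.Set.empty : PySem.Set String) = [] from rfl,
      ← PySem.Set.ofList_eq_foldl, ofList_length_eq_card]
  have hcardle : ps.toFinset.card ≤ ps.length := List.toFinset_card_le ps
  simp only [PySem.Set.empty, List.length_nil] at hA ⊢
  rw [hA]
  rw [hcard, hlen] at hadj
  have hlenps : ps.length = hashe.length := by simp [hps]
  omega
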